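-- pv_equiv track=rewrite | github.com/gabrielfn-vcs/ctf-notes | ctf-writeups/immersive-labs/04-parellus-power/decrypt.py | decrypt_file
-- ===== SOURCE A (Python) =====
-- def decrypt_file(file_content, key):
--     # Convert key to its hex representation
--     key_hex = key.encode('utf-8').hex()
--     key_bytes = [key_hex[i:i+2] for i in range(0, len(key_hex), 2)]
--     key_size = len(key_bytes)
--
--     # Convert the file content from hex to bytes
--     data_bytes = [file_content[i:i+2] for i in range(0, len(file_content), 2)]
--
--     decrypted = bytearray()
--     for i, byte in enumerate(data_bytes):
--         xored = int(byte, 16) ^ int(key_bytes[i % key_size], 16)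
--         decrypted.append(xored)
--
--     # Decode as Base64 and return
--     return bytes(decrypted).decode('utf-8', errors='replace')
-- ===== SOURCE B (Python) =====
-- def decrypt_file(file_content, key):
--     # Key bytes and data bytes (same hex-pair slicing as the cipher format).
--     key_bytes = list(key.encode('utf-8'))
--     data = [int(file_content[i:i+2], 16) for i in range(0, len(file_content), 2)]
--     n = len(data)
--     # Tile the key out to the data length (len(key_bytes)==0 raises ZeroDivisionError).
--     keystream = (key_bytes * (n // len(key_bytes) + 1))[:n]
--     # XOR everything in one shot as big integers; fixed-length to_bytes keeps leading zeros.
--     x = int.from_bytes(bytes(data), 'big') ^ int.from_bytes(bytes(keystream), 'big')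
--     return x.to_bytes(n, 'big').decode('utf-8', errors='replace')
-- ===== Notes on version B (the rewrite author's own statement) =====
-- stated objective: faster
-- what changed: Replaces A's per-byte append loop indexing the hex-pair key table with i % key_size by tiling the key bytes to the data length and XORing data and keystream in one shot as big integers (int.from_bytes / ^ / to_bytes).
-- outside the precondition, e.g. on decrypt_file('', ''): A returns '', B raises ZeroDivisionError
import Mathlib
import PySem

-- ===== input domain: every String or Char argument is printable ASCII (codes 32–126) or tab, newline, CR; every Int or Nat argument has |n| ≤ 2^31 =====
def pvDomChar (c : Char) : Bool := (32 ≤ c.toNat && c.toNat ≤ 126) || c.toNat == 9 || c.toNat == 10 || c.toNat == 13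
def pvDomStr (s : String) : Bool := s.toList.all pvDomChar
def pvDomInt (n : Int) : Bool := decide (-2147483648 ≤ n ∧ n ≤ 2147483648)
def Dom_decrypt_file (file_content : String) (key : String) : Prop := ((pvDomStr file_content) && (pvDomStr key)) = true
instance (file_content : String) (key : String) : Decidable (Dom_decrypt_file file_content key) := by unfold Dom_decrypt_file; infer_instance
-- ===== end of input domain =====

-- B replaces A's per-byte append loop (index i % key_size into the hex-pair key table) by tiling
-- the key bytes to the data length and XORing the two byte strings as single big integers
-- (int.from_bytes / ^ / to_bytes); objective: faster (a constant-factor mechanism: one bulk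
-- big-integer XOR replaces the per-byte Python loop).
-- Both programs decode the result with bytes.decode('utf-8', errors='replace'); that builtin is
-- ported by hand in each port (utf8Replace for A, eatCont/utf8DecodeB for B), exact for CPython's
-- maximal-subpart replacement policy.

-- ===== PORT A =====
-- port of the builtin chr-level UTF-8 encoder (key.encode('utf-8')); exact for all code points
def utf8EncodeChar (c : Char) : List Nat :=
  let n := c.toNat
  if n < 128 then [n]
  else if n < 2048 then [192 + n / 64, 128 + n % 64]
  else if n < 65536 then [224 + n / 4096, 128 + (n / 64) % 64, 128 + n % 64]
  else [240 + n / 262144, 128 + (n / 4096) % 64, 128 + (n / 64) % 64, 128 + n % 64]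

-- one byte of bytes.hex(): two lowercase hex digits
def byteToHex (b : Nat) : List Char := [Nat.digitChar (b / 16), Nat.digitChar (b % 16)]

-- [s[i:i+2] for i in range(0, len(s), 2)] : successive pairs, odd tail kept as a 1-char slice
def hexSlices : List Char → List (List Char)
  | [] => []
  | [a] => [[a]]
  | a :: b :: rest => [a, b] :: hexSlices rest

-- int(s, 16), defaulted (the default is only reached outside Pre_); toNat exact for 0 ≤ v
def getHex (s : List Char) : Nat := ((PySem.Int.ofCharsBase? s 16).getD 0).toNat

-- bytes.decode('utf-8', errors='replace'): hand port of CPython's decoder, one U+FFFD per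
-- maximal subpart of an ill-formed sequence; exact on all byte lists (fuzz-checked vs CPython)
def utf8Replace : List Nat → List Char
  | [] => []
  | b :: rest =>
    if b < 128 then Char.ofNat b :: utf8Replace rest
    else if 194 ≤ b ∧ b ≤ 223 then
      match rest with
      | c :: rest2 =>
        if 128 ≤ c ∧ c ≤ 191 then Char.ofNat ((b - 192) * 64 + (c - 128)) :: utf8Replace rest2
        else Char.ofNat 65533 :: utf8Replace (c :: rest2)
      | [] => [Char.ofNat 65533]
    else if 224 ≤ b ∧ b ≤ 239 then
      match rest with
      | c :: rest2 =>
        if (if b = 224 then 160 else 128) ≤ c ∧ c ≤ (if b = 237 then 159 else 191) then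
          match rest2 with
          | d :: rest3 =>
            if 128 ≤ d ∧ d ≤ 191 then
              Char.ofNat ((b - 224) * 4096 + (c - 128) * 64 + (d - 128)) :: utf8Replace rest3
            else Char.ofNat 65533 :: utf8Replace (d :: rest3)
          | [] => [Char.ofNat 65533]
        else Char.ofNat 65533 :: utf8Replace (c :: rest2)
      | [] => [Char.ofNat 65533]
    else if 240 ≤ b ∧ b ≤ 244 then
      match rest with
      | c :: rest2 =>
        if (if b = 240 then 144 else 128) ≤ c ∧ c ≤ (if b = 244 then 143 else 191) then
          match rest2 with
          | d :: rest3 =>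
            if 128 ≤ d ∧ d ≤ 191 then
              match rest3 with
              | e :: rest4 =>
                if 128 ≤ e ∧ e ≤ 191 then
                  Char.ofNat ((b - 240) * 262144 + (c - 128) * 4096 + (d - 128) * 64 + (e - 128)) ::
                    utf8Replace rest4
                else Char.ofNat 65533 :: utf8Replace (e :: rest4)
              | [] => [Char.ofNat 65533]
            else Char.ofNat 65533 :: utf8Replace (d :: rest3)
          | [] => [Char.ofNat 65533]
        else Char.ofNat 65533 :: utf8Replace (c :: rest2)
      | [] => [Char.ofNat 65533]
    else Char.ofNat 65533 :: utf8Replace rest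
termination_by l => l.length
decreasing_by all_goals (simp_all [List.length_cons]; try omega)

def decrypt_file (file_content : String) (key : String) : String :=
  let keyEnc := (key.toList.map utf8EncodeChar).flatten          -- key.encode('utf-8')
  let keyHex := (keyEnc.map byteToHex).flatten                   -- .hex()
  let keyBytes := hexSlices keyHex                               -- key_bytes
  let keySize := keyBytes.length
  let dataBytes := hexSlices file_content.toList                 -- data_bytes
  let decrypted := (PySem.List.enumerate dataBytes).foldl
    (fun acc p =>
      acc ++ [(getHex p.2) ^^^
        (getHex (PySem.List.pyGetD keyBytes (PySem.Int.mod p.1 (keySize : Int)) []))]) []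
  String.ofList (utf8Replace decrypted)

-- ===== PORT B =====
-- B's port of key.encode('utf-8'), one char: UTF-8 by shift/mask bit operations
def keyByteB (c : Char) : List Nat :=
  let n := c.toNat
  if n ≤ 127 then [n]
  else if n ≤ 2047 then [192 ||| (n >>> 6), 128 ||| (n &&& 63)]
  else if n ≤ 65535 then [224 ||| (n >>> 12), 128 ||| ((n >>> 6) &&& 63), 128 ||| (n &&& 63)]
  else [240 ||| (n >>> 18), 128 ||| ((n >>> 12) &&& 63), 128 ||| ((n >>> 6) &&& 63), 128 ||| (n &&& 63)]

def fromBytesBE (l : List Nat) : Nat := l.foldl (fun a b => a * 256 + b) 0   -- int.from_bytes(_, 'big')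

def toBytesBE : Nat → Nat → List Nat                                          -- x.to_bytes(n, 'big')
  | 0, _ => []
  | n + 1, x => toBytesBE n (x / 256) ++ [x % 256]

-- B's port of bytes.decode('utf-8', errors='replace'): a table-driven decoder.
-- uLenB: how many bytes a sequence starting with this lead byte has (0 = invalid lead);
-- uLoB/uHiB: admissible range of the FIRST continuation byte; uValB: payload of the lead byte.
def uLenB (b : Nat) : Nat :=
  if b ≤ 127 then 1 else if b ≤ 193 then 0 else if b ≤ 223 then 2
  else if b ≤ 239 then 3 else if b ≤ 244 then 4 else 0

def uLoB (b : Nat) : Nat := if b = 224 then 160 else if b = 240 then 144 else 128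
def uHiB (b : Nat) : Nat := if b = 237 then 159 else if b = 244 then 143 else 191
def uValB (b : Nat) : Nat := if b ≤ 223 then b - 192 else if b ≤ 239 then b - 224 else b - 240

-- eat k continuation bytes (the first bounded by lo..hi, the rest by 128..191), accumulating the
-- code point; on a bad or missing byte return none together with the resumption point
def eatCont (lo hi v : Nat) : Nat → List Nat → Option Nat × List Nat
  | 0, rest => (some v, rest)
  | _ + 1, [] => (none, [])
  | k + 1, c :: rest =>
    if lo ≤ c ∧ c ≤ 191 ∧ c ≤ hi then eatCont 128 191 (v * 64 + (c - 128)) k rest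
    else (none, c :: rest)

theorem eatCont_snd_length (lo hi v k : Nat) (rest : List Nat) :
    (eatCont lo hi v k rest).2.length ≤ rest.length := by
  induction k generalizing lo hi v rest with
  | zero => simp [eatCont]
  | succ k ih =>
    match rest with
    | [] => simp [eatCont]
    | c :: rest =>
      rw [eatCont]
      split
      · exact le_trans (ih _ _ _ _) (by simp)
      · simp

def utf8DecodeB : List Nat → List Char
  | [] => []
  | b :: rest =>
    match uLenB b with
    | 0 => Char.ofNat 65533 :: utf8DecodeB rest
    | 1 => Char.ofNat b :: utf8DecodeB rest
    | L + 2 =>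
      match h : eatCont (uLoB b) (uHiB b) (uValB b) (L + 1) rest with
      | (some v, rest') => Char.ofNat v :: utf8DecodeB rest'
      | (none, rest') => Char.ofNat 65533 :: utf8DecodeB rest'
termination_by l => l.length
decreasing_by
  all_goals
    (try (have h2 : rest'.length ≤ rest.length := by
            have h3 := eatCont_snd_length (uLoB b) (uHiB b) (uValB b) (L + 1) rest
            rw [h] at h3
            exact h3));
    simp only [List.length_cons]
    omega

def decrypt_file_alt (file_content : String) (key : String) : String :=
  let keyB := key.toList.foldr (fun c acc => keyByteB c ++ acc) []   -- list(key.encode('utf-8'))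
  let cs := file_content.toList
  let data := (PySem.List.pyRange 0 (cs.length : Int) 2).map        -- [int(fc[i:i+2],16) for i in range(0,len(fc),2)]
    (fun i => ((PySem.Int.ofCharsBase? (PySem.List.slice cs (some i) (some (i + 2))) 16).getD 0).toNat)
  let n := data.length
  let reps := n / keyB.length + 1
  let keystream := ((List.replicate reps keyB).flatten).take n      -- (key_bytes * reps)[:n]
  let x := fromBytesBE data ^^^ fromBytesBE keystream
  String.ofList (utf8DecodeB (toBytesBE n x))

-- ===== PRECONDITION & SPEC =====
-- slice parses under int(_,16) to a byte value 0..255 (automatic for a hex pair; negative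
-- values would make bytearray.append raise ValueError in A and bytes() raise in B)
def hexByteOk (s : List Char) : Bool :=
  match PySem.Int.ofCharsBase? s 16 with
  | some v => decide (0 ≤ v ∧ v < 256)
  | none => false

-- Pre_ excludes content whose 2-char slices do not parse as nonnegative bytes (ValueError in A)
-- and the empty key (ZeroDivisionError in A for non-empty content; B's tiling division raises
-- ZeroDivisionError even for empty content, where A returns '').
def Pre_decrypt_file (file_content : String) (key : String) : Prop :=
  (∀ i ∈ List.range ((file_content.length + 1) / 2),
    hexByteOk ((file_content.toList.drop (2 * i)).take 2) = true) ∧ key ≠ ""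
instance (file_content : String) (key : String) : Decidable (Pre_decrypt_file file_content key) := by
  unfold Pre_decrypt_file; infer_instance

def pvWitness_decrypt_file : String × String := ("48656c6c6f", "key")

def Spec_decrypt_file (file_content : String) (key : String) (out : String) : Prop :=
  out = decrypt_file_alt file_content key
instance (file_content : String) (key : String) (out : String) :
    Decidable (Spec_decrypt_file file_content key out) := by
  unfold Spec_decrypt_file; infer_instance

-- ===== CLAIM (what is proved, stated in full; the proofs are below) =====
def Claim_equal_decrypt_file : Prop :=
  ∀ (file_content : String) (key : String), Dom_decrypt_file file_content key →
    Pre_decrypt_file file_content key →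
    Spec_decrypt_file file_content key (decrypt_file file_content key)

-- ===== LEMMAS AND PROOFS =====

theorem encode_ascii (c : Char) (h : c.toNat < 128) : utf8EncodeChar c = [c.toNat] := by
  simp [utf8EncodeChar, h]

theorem hexSlices_flatten (L : List (List Char)) (h : ∀ x ∈ L, x.length = 2) :
    hexSlices L.flatten = L := by
  induction L with
  | nil => rfl
  | cons x L ih =>
    match x, h x (by simp) with
    | [a, b], _ =>
      simp only [List.flatten_cons, List.cons_append, List.nil_append, hexSlices]
      exact congrArg _ (ih fun y hy => h y (by simp [hy]))

set_option maxRecDepth 100000 in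
theorem getHex_byteToHex (b : Nat) (h : b < 256) : getHex (byteToHex b) = b := by
  revert b h; decide

theorem fromBytesBE_acc (l : List Nat) :
    ∀ acc, l.foldl (fun a b => a * 256 + b) acc = acc * 256 ^ l.length + fromBytesBE l := by
  induction l with
  | nil => intro acc; simp [fromBytesBE]
  | cons x l ih =>
    intro acc
    simp only [List.foldl_cons, List.length_cons, fromBytesBE] at *
    rw [ih (acc * 256 + x), ih (0 * 256 + x)]
    ring

theorem fromBytesBE_cons (a : Nat) (l : List Nat) :
    fromBytesBE (a :: l) = a * 256 ^ l.length + fromBytesBE l := by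
  simpa [fromBytesBE] using fromBytesBE_acc l a

theorem fromBytesBE_lt (l : List Nat) (h : ∀ x ∈ l, x < 256) :
    fromBytesBE l < 256 ^ l.length := by
  induction l with
  | nil => simp [fromBytesBE]
  | cons a l ih =>
    rw [fromBytesBE_cons, List.length_cons]
    have ha : a < 256 := h a (by simp)
    have hl := ih (fun x hx => h x (by simp [hx]))
    calc a * 256 ^ l.length + fromBytesBE l
        < a * 256 ^ l.length + 256 ^ l.length := by omega
      _ = (a + 1) * 256 ^ l.length := by ring
      _ ≤ 256 * 256 ^ l.length := by
          exact Nat.mul_le_mul_right _ (by omega)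
      _ = 256 ^ (l.length + 1) := by ring

theorem xor_pow_add (k a b x y : Nat) (hx : x < 2 ^ k) (hy : y < 2 ^ k) :
    (2 ^ k * a + x) ^^^ (2 ^ k * b + y) = 2 ^ k * (a ^^^ b) + (x ^^^ y) := by
  apply Nat.eq_of_testBit_eq
  intro j
  rw [Nat.testBit_xor, Nat.testBit_two_pow_mul_add _ hx, Nat.testBit_two_pow_mul_add _ hy,
    Nat.testBit_two_pow_mul_add _ (Nat.xor_lt_two_pow hx hy)]
  by_cases hj : j < k <;> simp [hj, Nat.testBit_xor]

theorem pow256 (m : Nat) : (256 : Nat) ^ m = 2 ^ (8 * m) := by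
  rw [pow_mul]; norm_num

theorem fromBytesBE_zipWith_xor (as : List Nat) :
    ∀ bs : List Nat, as.length = bs.length → (∀ x ∈ as, x < 256) → (∀ x ∈ bs, x < 256) →
      fromBytesBE (List.zipWith (· ^^^ ·) as bs) = fromBytesBE as ^^^ fromBytesBE bs := by
  induction as with
  | nil => intro bs h _ _; rw [List.length_eq_zero_iff.mp h.symm]; rfl
  | cons a as ih =>
    intro bs hlen has hbs
    match bs, hlen with
    | b :: bs, hlen =>
      have hlen' : as.length = bs.length := by simpa using hlen
      rw [List.zipWith_cons_cons, fromBytesBE_cons, fromBytesBE_cons, fromBytesBE_cons]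
      have h1 : fromBytesBE as < 2 ^ (8 * as.length) := by
        rw [← pow256]; exact fromBytesBE_lt as (fun x hx => has x (by simp [hx]))
      have h2 : fromBytesBE bs < 2 ^ (8 * as.length) := by
        rw [← pow256, hlen']; exact fromBytesBE_lt bs (fun x hx => hbs x (by simp [hx]))
      rw [List.length_zipWith, hlen', Nat.min_self, ← hlen']
      rw [ih bs hlen' (fun x hx => has x (by simp [hx])) (fun x hx => hbs x (by simp [hx]))]
      rw [pow256, Nat.mul_comm a _, Nat.mul_comm b _, Nat.mul_comm ((a ^^^ b)) _]
      exact (xor_pow_add _ _ _ _ _ h1 h2).symm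

theorem fromBytesBE_append (l : List Nat) (a : Nat) :
    fromBytesBE (l ++ [a]) = 256 * fromBytesBE l + a := by
  simp [fromBytesBE, List.foldl_append]; ring

theorem toBytesBE_fromBytesBE (l : List Nat) (h : ∀ x ∈ l, x < 256) :
    toBytesBE l.length (fromBytesBE l) = l := by
  induction l using List.reverseRecOn with
  | nil => rfl
  | append_singleton l a ih =>
    have ha : a < 256 := h a (by simp)
    rw [fromBytesBE_append, List.length_append, List.length_cons]
    show toBytesBE (l.length + 1) _ = _
    rw [toBytesBE]
    have hd : (256 * fromBytesBE l + a) / 256 = fromBytesBE l := by omega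
    have hm : (256 * fromBytesBE l + a) % 256 = a := by omega
    rw [hd, hm, ih (fun x hx => h x (by simp [hx]))]

theorem flatten_replicate_getElem? (l : List Nat) (_hK : 0 < l.length) :
    ∀ (r : Nat) (i : Nat), i < r * l.length →
      ((List.replicate r l).flatten)[i]? = l[i % l.length]? := by
  intro r
  induction r with
  | zero => intro i hi; omega
  | succ r ih =>
    intro i hi
    rw [List.replicate_succ, List.flatten_cons]
    by_cases h : i < l.length
    · rw [List.getElem?_append_left h, Nat.mod_eq_of_lt h]
    · have e1 : (r + 1) * l.length = r * l.length + l.length := by ring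
      have e2 : r.succ * l.length = (r + 1) * l.length := rfl
      have h1 : i - l.length < r * l.length := by omega
      rw [List.getElem?_append_right (by omega), ih (i - l.length) h1]
      congr 1
      conv_rhs => rw [show i = i - l.length + l.length by omega]
      rw [Nat.add_mod_right]

theorem length_flatten_replicate {α : Type} (r : Nat) (l : List α) :
    ((List.replicate r l).flatten).length = r * l.length := by
  induction r with
  | zero => simp
  | succ r ih => rw [List.replicate_succ, List.flatten_cons, List.length_append, ih]; ring

theorem getHex_lt (s : List Char) (h : hexByteOk s = true) : getHex s < 256 := by
  unfold hexByteOk at h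
  cases hv : PySem.Int.ofCharsBase? s 16 with
  | none => rw [hv] at h; simp at h
  | some v =>
    rw [hv] at h
    simp only [decide_eq_true_eq] at h
    unfold getHex
    rw [hv, Option.getD_some]
    omega

theorem pyGetD_nat_lt {α : Type} (xs : List α) (k : Nat) (d : α) (h : k < xs.length) :
    PySem.List.pyGetD xs (k : Int) d = xs[k] := by
  rw [PySem.List.pyGetD_natCast, List.getD_eq_getElem?_getD, List.getElem?_eq_getElem h,
    Option.getD_some]

-- the key's bytes under Dom: plain ASCII codes, one per char — A's encoder
theorem encFlatten (cs : List Char) (h : ∀ c ∈ cs, c.toNat < 128) :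
    (cs.map utf8EncodeChar).flatten = cs.map (fun c => c.toNat) := by
  induction cs with
  | nil => rfl
  | cons c cs ih =>
    simp only [List.map_cons, List.flatten_cons, encode_ascii c (h c (by simp))]
    rw [ih (fun x hx => h x (by simp [hx]))]
    rfl

-- the key's bytes under Dom: plain ASCII codes, one per char — B's encoder
theorem encFoldrB (cs : List Char) (h : ∀ c ∈ cs, c.toNat < 128) :
    cs.foldr (fun c acc => keyByteB c ++ acc) [] = cs.map (fun c => c.toNat) := by
  induction cs with
  | nil => rfl
  | cons c cs ih =>
    have hc : c.toNat ≤ 127 := by have := h c (by simp); omega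
    rw [List.foldr_cons, ih (fun x hx => h x (by simp [hx]))]
    have hk : keyByteB c = [c.toNat] := by simp [keyByteB, hc]
    rw [hk]
    rfl

theorem domChar_lt (c : Char) (h : pvDomChar c = true) : c.toNat < 128 := by
  simp only [pvDomChar, Bool.or_eq_true, Bool.and_eq_true, decide_eq_true_eq, beq_iff_eq] at h
  omega

theorem xor_lt_256 (a b : Nat) (ha : a < 256) (hb : b < 256) : a ^^^ b < 256 := by
  have h := @Nat.xor_lt_two_pow a b 8 (by omega) (by omega)
  norm_num at h
  exact h

theorem zipWith_xor_lt_256 (as : List Nat) :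
    ∀ bs : List Nat, (∀ x ∈ as, x < 256) → (∀ x ∈ bs, x < 256) →
      ∀ x ∈ List.zipWith (· ^^^ ·) as bs, x < 256 := by
  induction as with
  | nil => intro bs _ _ x hx; simp at hx
  | cons a as ih =>
    intro bs ha hb x hx
    match bs with
    | [] => simp at hx
    | b :: bs =>
      rw [List.zipWith_cons_cons, List.mem_cons] at hx
      rcases hx with rfl | hx
      · exact xor_lt_256 a b (ha a (by simp)) (hb b (by simp))
      · exact ih bs (fun y hy => ha y (by simp [hy])) (fun y hy => hb y (by simp [hy])) x hx

theorem int_mod_nat (i k : Nat) : PySem.Int.mod (0 + (i : Int)) (k : Int) = ((i % k : Nat) : Int) := by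
  simp only [PySem.Int.mod, zero_add]
  rw [Int.fmod_eq_emod]
  push_cast
  rfl

theorem hexSlices_mem_shape (l : List Char) :
    ∀ s ∈ hexSlices l, ∃ i, 2 * i < l.length ∧ s = (l.drop (2 * i)).take 2 := by
  induction l using hexSlices.induct with
  | case1 => intro s hs; simp [hexSlices] at hs
  | case2 a => intro s hs; simp [hexSlices] at hs; exact ⟨0, by simp, by simp [hs]⟩
  | case3 a b rest ih =>
    intro s hs
    rw [hexSlices, List.mem_cons] at hs
    rcases hs with rfl | hs
    · exact ⟨0, by simp, by simp⟩
    · obtain ⟨i, hi, rfl⟩ := ih s hs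
      refine ⟨i + 1, by simp; omega, ?_⟩
      have : 2 * (i + 1) = (2 * i) + 1 + 1 := by ring
      rw [this, List.drop_succ_cons, List.drop_succ_cons]

-- B's range(0, len, 2) comprehension visits exactly A's hex pairs
theorem rangePairs (f : List Char → Nat) (l : List Char) :
    (List.range ((l.length + 1) / 2)).map (fun k => f ((l.drop (2 * k)).take 2)) =
      (hexSlices l).map f := by
  induction l using hexSlices.induct with
  | case1 => rfl
  | case2 a => simp [hexSlices]
  | case3 a b rest ih =>
    have hlen : ((a :: b :: rest).length + 1) / 2 = (rest.length + 1) / 2 + 1 := by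
      simp only [List.length_cons]; omega
    rw [hlen, List.range_succ_eq_map, List.map_cons, List.map_map, hexSlices, List.map_cons, ← ih]
    rfl

theorem dataB_eq (l : List Char) :
    ((PySem.List.pyRange 0 (l.length : Int) 2).map
      (fun i => ((PySem.Int.ofCharsBase? (PySem.List.slice l (some i) (some (i + 2))) 16).getD 0).toNat)) =
      (hexSlices l).map getHex := by
  rw [PySem.List.pyRange_of_pos 0 (l.length : Int) (by norm_num)]
  have hcount : (if (0 : Int) < (l.length : Int) then (((l.length : Int) - 0 + 2 - 1) / 2).toNat else 0) =
      (l.length + 1) / 2 := by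
    split
    · omega
    · omega
  rw [hcount, List.map_map, ← rangePairs getHex l]
  apply List.map_congr_left
  intro k _
  show ((PySem.Int.ofCharsBase? (PySem.List.slice l (some (0 + 2 * (k : Int))) (some (0 + 2 * (k : Int) + 2))) 16).getD 0).toNat = _
  have h1 : (0 + 2 * (k : Int)) = ((2 * k : Nat) : Int) := by push_cast; ring
  have h2 : (0 + 2 * (k : Int) + 2) = ((2 * k + 2 : Nat) : Int) := by push_cast; ring
  rw [h1]
  have h2 : ((2 * k : Nat) : Int) + 2 = ((2 * k + 2 : Nat) : Int) := by push_cast; ring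
  rw [h2, PySem.List.slice_natCast]
  have h3 : 2 * k + 2 - 2 * k = 2 := by omega
  rw [h3]
  rfl

-- unfolding lemmas for the two WF-recursive decoders
theorem decodeB_nil : utf8DecodeB [] = [] := by rw [utf8DecodeB]

theorem decodeB_len0 (b : Nat) (rest : List Nat) (h : uLenB b = 0) :
    utf8DecodeB (b :: rest) = Char.ofNat 65533 :: utf8DecodeB rest := by
  rw [utf8DecodeB.eq_def]
  simp only [h]

theorem decodeB_len1 (b : Nat) (rest : List Nat) (h : uLenB b = 1) :
    utf8DecodeB (b :: rest) = Char.ofNat b :: utf8DecodeB rest := by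
  rw [utf8DecodeB.eq_def]
  simp only [h]

theorem decodeB_len2 (b : Nat) (rest : List Nat) (h : uLenB b = 2) :
    utf8DecodeB (b :: rest) =
      match eatCont (uLoB b) (uHiB b) (uValB b) 1 rest with
      | (some v, rest') => Char.ofNat v :: utf8DecodeB rest'
      | (none, rest') => Char.ofNat 65533 :: utf8DecodeB rest' := by
  rw [utf8DecodeB.eq_def]
  simp only [h]
  rcases hE : eatCont (uLoB b) (uHiB b) (uValB b) 1 rest with ⟨o, r⟩
  cases o <;> rfl

theorem decodeB_len3 (b : Nat) (rest : List Nat) (h : uLenB b = 3) :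
    utf8DecodeB (b :: rest) =
      match eatCont (uLoB b) (uHiB b) (uValB b) 2 rest with
      | (some v, rest') => Char.ofNat v :: utf8DecodeB rest'
      | (none, rest') => Char.ofNat 65533 :: utf8DecodeB rest' := by
  rw [utf8DecodeB.eq_def]
  simp only [h]
  rcases hE : eatCont (uLoB b) (uHiB b) (uValB b) 2 rest with ⟨o, r⟩
  cases o <;> rfl

theorem decodeB_len4 (b : Nat) (rest : List Nat) (h : uLenB b = 4) :
    utf8DecodeB (b :: rest) =
      match eatCont (uLoB b) (uHiB b) (uValB b) 3 rest with
      | (some v, rest') => Char.ofNat v :: utf8DecodeB rest'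
      | (none, rest') => Char.ofNat 65533 :: utf8DecodeB rest' := by
  rw [utf8DecodeB.eq_def]
  simp only [h]
  rcases hE : eatCont (uLoB b) (uHiB b) (uValB b) 3 rest with ⟨o, r⟩
  cases o <;> rfl

theorem utf8Replace_cons (b : Nat) (rest : List Nat) :
    utf8Replace (b :: rest) =
    (if b < 128 then Char.ofNat b :: utf8Replace rest
    else if 194 ≤ b ∧ b ≤ 223 then
      match rest with
      | c :: rest2 =>
        if 128 ≤ c ∧ c ≤ 191 then Char.ofNat ((b - 192) * 64 + (c - 128)) :: utf8Replace rest2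
        else Char.ofNat 65533 :: utf8Replace (c :: rest2)
      | [] => [Char.ofNat 65533]
    else if 224 ≤ b ∧ b ≤ 239 then
      match rest with
      | c :: rest2 =>
        if (if b = 224 then 160 else 128) ≤ c ∧ c ≤ (if b = 237 then 159 else 191) then
          match rest2 with
          | d :: rest3 =>
            if 128 ≤ d ∧ d ≤ 191 then
              Char.ofNat ((b - 224) * 4096 + (c - 128) * 64 + (d - 128)) :: utf8Replace rest3
            else Char.ofNat 65533 :: utf8Replace (d :: rest3)
          | [] => [Char.ofNat 65533]
        else Char.ofNat 65533 :: utf8Replace (c :: rest2)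
      | [] => [Char.ofNat 65533]
    else if 240 ≤ b ∧ b ≤ 244 then
      match rest with
      | c :: rest2 =>
        if (if b = 240 then 144 else 128) ≤ c ∧ c ≤ (if b = 244 then 143 else 191) then
          match rest2 with
          | d :: rest3 =>
            if 128 ≤ d ∧ d ≤ 191 then
              match rest3 with
              | e :: rest4 =>
                if 128 ≤ e ∧ e ≤ 191 then
                  Char.ofNat ((b - 240) * 262144 + (c - 128) * 4096 + (d - 128) * 64 + (e - 128)) ::
                    utf8Replace rest4
                else Char.ofNat 65533 :: utf8Replace (e :: rest4)
              | [] => [Char.ofNat 65533]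
            else Char.ofNat 65533 :: utf8Replace (d :: rest3)
          | [] => [Char.ofNat 65533]
        else Char.ofNat 65533 :: utf8Replace (c :: rest2)
      | [] => [Char.ofNat 65533]
    else Char.ofNat 65533 :: utf8Replace rest) := by
  conv_lhs => rw [utf8Replace.eq_def]

-- B's table-driven decoder computes A's decoder on every byte list
theorem decodeB_eq (l : List Nat) : utf8DecodeB l = utf8Replace l := by
  induction l using utf8Replace.induct with
  | case1 => rw [decodeB_nil, utf8Replace]
  | case2 b rest h ih =>
    have hL : uLenB b = 1 := by simp only [uLenB]; split_ifs <;> omega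
    rw [decodeB_len1 b rest hL, utf8Replace_cons, if_pos h, ih]
  | case3 b h1 h2 c rest2 h3 ih =>
    have hL : uLenB b = 2 := by simp only [uLenB]; split_ifs <;> omega
    have hlo : uLoB b = 128 := by simp only [uLoB]; split_ifs <;> omega
    have hhi : uHiB b = 191 := by simp only [uHiB]; split_ifs <;> omega
    have hv : uValB b = b - 192 := by simp only [uValB]; split_ifs <;> omega
    rw [decodeB_len2 b _ hL, utf8Replace_cons]
    simp only [hlo, hhi, hv, if_neg h1, if_pos h2, if_pos h3, eatCont,
      if_pos (by omega : 128 ≤ c ∧ c ≤ 191 ∧ c ≤ 191), ih]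
  | case4 b h1 h2 c rest2 h3 ih =>
    have hL : uLenB b = 2 := by simp only [uLenB]; split_ifs <;> omega
    have hlo : uLoB b = 128 := by simp only [uLoB]; split_ifs <;> omega
    have hhi : uHiB b = 191 := by simp only [uHiB]; split_ifs <;> omega
    rw [decodeB_len2 b _ hL, utf8Replace_cons]
    simp only [hlo, hhi, if_neg h1, if_pos h2, if_neg h3, eatCont,
      if_neg (by omega : ¬(128 ≤ c ∧ c ≤ 191 ∧ c ≤ 191)), ih]
  | case5 b h1 h2 =>
    have hL : uLenB b = 2 := by simp only [uLenB]; split_ifs <;> omega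
    rw [decodeB_len2 b _ hL, utf8Replace_cons]
    simp only [if_neg h1, if_pos h2, eatCont, decodeB_nil]
  | case6 b h1 h2 h3 c h4 d rest3 h5 ih =>
    have h4' : (if b = 224 then 160 else 128) ≤ c ∧ c ≤ (if b = 237 then 159 else 191) := h4
    have hL : uLenB b = 3 := by simp only [uLenB]; split_ifs <;> omega
    have hv : uValB b = b - 224 := by simp only [uValB]; split_ifs <;> omega
    have hc1 : uLoB b ≤ c ∧ c ≤ 191 ∧ c ≤ uHiB b := by
      simp only [uLoB, uHiB]; split_ifs at h4' ⊢ <;> omega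
    have hval : ((b - 224) * 64 + (c - 128)) * 64 + (d - 128) =
        (b - 224) * 4096 + (c - 128) * 64 + (d - 128) := by omega
    rw [decodeB_len3 b _ hL, utf8Replace_cons]
    simp only [hv, if_neg h1, if_neg h2, if_pos h3, if_pos h4', if_pos h5, eatCont,
      if_pos hc1, if_pos (by omega : 128 ≤ d ∧ d ≤ 191 ∧ d ≤ 191), hval, ih]
  | case7 b h1 h2 h3 c h4 d rest3 h5 ih =>
    have h4' : (if b = 224 then 160 else 128) ≤ c ∧ c ≤ (if b = 237 then 159 else 191) := h4
    have hL : uLenB b = 3 := by simp only [uLenB]; split_ifs <;> omega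
    have hc1 : uLoB b ≤ c ∧ c ≤ 191 ∧ c ≤ uHiB b := by
      simp only [uLoB, uHiB]; split_ifs at h4' ⊢ <;> omega
    rw [decodeB_len3 b _ hL, utf8Replace_cons]
    simp only [if_neg h1, if_neg h2, if_pos h3, if_pos h4', if_neg h5, eatCont,
      if_pos hc1, if_neg (by omega : ¬(128 ≤ d ∧ d ≤ 191 ∧ d ≤ 191)), ih]
  | case8 b h1 h2 h3 c h4 =>
    have h4' : (if b = 224 then 160 else 128) ≤ c ∧ c ≤ (if b = 237 then 159 else 191) := h4
    have hL : uLenB b = 3 := by simp only [uLenB]; split_ifs <;> omega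
    have hc1 : uLoB b ≤ c ∧ c ≤ 191 ∧ c ≤ uHiB b := by
      simp only [uLoB, uHiB]; split_ifs at h4' ⊢ <;> omega
    rw [decodeB_len3 b _ hL, utf8Replace_cons]
    simp only [if_neg h1, if_neg h2, if_pos h3, if_pos h4', eatCont, if_pos hc1, decodeB_nil]
  | case9 b h1 h2 h3 c rest2 h4 ih =>
    have h4' : ¬((if b = 224 then 160 else 128) ≤ c ∧ c ≤ (if b = 237 then 159 else 191)) := h4
    have hL : uLenB b = 3 := by simp only [uLenB]; split_ifs <;> omega
    have hc1 : ¬(uLoB b ≤ c ∧ c ≤ 191 ∧ c ≤ uHiB b) := by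
      simp only [uLoB, uHiB]; split_ifs at h4' ⊢ <;> omega
    rw [decodeB_len3 b _ hL, utf8Replace_cons]
    simp only [if_neg h1, if_neg h2, if_pos h3, if_neg h4', eatCont, if_neg hc1, ih]
  | case10 b h1 h2 h3 =>
    have hL : uLenB b = 3 := by simp only [uLenB]; split_ifs <;> omega
    rw [decodeB_len3 b _ hL, utf8Replace_cons]
    simp only [if_neg h1, if_neg h2, if_pos h3, eatCont, decodeB_nil]
  | case11 b h1 h2 h3 h4 c h5 d h6 e rest4 h7 ih =>
    have h5' : (if b = 240 then 144 else 128) ≤ c ∧ c ≤ (if b = 244 then 143 else 191) := h5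
    have hL : uLenB b = 4 := by simp only [uLenB]; split_ifs <;> omega
    have hv : uValB b = b - 240 := by simp only [uValB]; split_ifs <;> omega
    have hc1 : uLoB b ≤ c ∧ c ≤ 191 ∧ c ≤ uHiB b := by
      simp only [uLoB, uHiB]; split_ifs at h5' ⊢ <;> omega
    have hval : (((b - 240) * 64 + (c - 128)) * 64 + (d - 128)) * 64 + (e - 128) =
        (b - 240) * 262144 + (c - 128) * 4096 + (d - 128) * 64 + (e - 128) := by omega
    rw [decodeB_len4 b _ hL, utf8Replace_cons]
    simp only [hv, if_neg h1, if_neg h2, if_neg h3, if_pos h4, if_pos h5', if_pos h6, if_pos h7,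
      eatCont, if_pos hc1, if_pos (by omega : 128 ≤ d ∧ d ≤ 191 ∧ d ≤ 191),
      if_pos (by omega : 128 ≤ e ∧ e ≤ 191 ∧ e ≤ 191), hval, ih]
  | case12 b h1 h2 h3 h4 c h5 d h6 e rest4 h7 ih =>
    have h5' : (if b = 240 then 144 else 128) ≤ c ∧ c ≤ (if b = 244 then 143 else 191) := h5
    have hL : uLenB b = 4 := by simp only [uLenB]; split_ifs <;> omega
    have hc1 : uLoB b ≤ c ∧ c ≤ 191 ∧ c ≤ uHiB b := by
      simp only [uLoB, uHiB]; split_ifs at h5' ⊢ <;> omega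
    rw [decodeB_len4 b _ hL, utf8Replace_cons]
    simp only [if_neg h1, if_neg h2, if_neg h3, if_pos h4, if_pos h5', if_pos h6, if_neg h7,
      eatCont, if_pos hc1, if_pos (by omega : 128 ≤ d ∧ d ≤ 191 ∧ d ≤ 191),
      if_neg (by omega : ¬(128 ≤ e ∧ e ≤ 191 ∧ e ≤ 191)), ih]
  | case13 b h1 h2 h3 h4 c h5 d h6 =>
    have h5' : (if b = 240 then 144 else 128) ≤ c ∧ c ≤ (if b = 244 then 143 else 191) := h5
    have hL : uLenB b = 4 := by simp only [uLenB]; split_ifs <;> omega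
    have hc1 : uLoB b ≤ c ∧ c ≤ 191 ∧ c ≤ uHiB b := by
      simp only [uLoB, uHiB]; split_ifs at h5' ⊢ <;> omega
    rw [decodeB_len4 b _ hL, utf8Replace_cons]
    simp only [if_neg h1, if_neg h2, if_neg h3, if_pos h4, if_pos h5', if_pos h6, eatCont,
      if_pos hc1, if_pos (by omega : 128 ≤ d ∧ d ≤ 191 ∧ d ≤ 191), decodeB_nil]
  | case14 b h1 h2 h3 h4 c h5 d rest3 h6 ih =>
    have h5' : (if b = 240 then 144 else 128) ≤ c ∧ c ≤ (if b = 244 then 143 else 191) := h5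
    have hL : uLenB b = 4 := by simp only [uLenB]; split_ifs <;> omega
    have hc1 : uLoB b ≤ c ∧ c ≤ 191 ∧ c ≤ uHiB b := by
      simp only [uLoB, uHiB]; split_ifs at h5' ⊢ <;> omega
    rw [decodeB_len4 b _ hL, utf8Replace_cons]
    simp only [if_neg h1, if_neg h2, if_neg h3, if_pos h4, if_pos h5', if_neg h6, eatCont,
      if_pos hc1, if_neg (by omega : ¬(128 ≤ d ∧ d ≤ 191 ∧ d ≤ 191)), ih]
  | case15 b h1 h2 h3 h4 c h5 =>
    have h5' : (if b = 240 then 144 else 128) ≤ c ∧ c ≤ (if b = 244 then 143 else 191) := h5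
    have hL : uLenB b = 4 := by simp only [uLenB]; split_ifs <;> omega
    have hc1 : uLoB b ≤ c ∧ c ≤ 191 ∧ c ≤ uHiB b := by
      simp only [uLoB, uHiB]; split_ifs at h5' ⊢ <;> omega
    rw [decodeB_len4 b _ hL, utf8Replace_cons]
    simp only [if_neg h1, if_neg h2, if_neg h3, if_pos h4, if_pos h5', eatCont, if_pos hc1,
      decodeB_nil]
  | case16 b h1 h2 h3 h4 c rest2 h5 ih =>
    have h5' : ¬((if b = 240 then 144 else 128) ≤ c ∧ c ≤ (if b = 244 then 143 else 191)) := h5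
    have hL : uLenB b = 4 := by simp only [uLenB]; split_ifs <;> omega
    have hc1 : ¬(uLoB b ≤ c ∧ c ≤ 191 ∧ c ≤ uHiB b) := by
      simp only [uLoB, uHiB]; split_ifs at h5' ⊢ <;> omega
    rw [decodeB_len4 b _ hL, utf8Replace_cons]
    simp only [if_neg h1, if_neg h2, if_neg h3, if_pos h4, if_neg h5', eatCont, if_neg hc1, ih]
  | case17 b h1 h2 h3 h4 =>
    have hL : uLenB b = 4 := by simp only [uLenB]; split_ifs <;> omega
    rw [decodeB_len4 b _ hL, utf8Replace_cons]
    simp only [if_neg h1, if_neg h2, if_neg h3, if_pos h4, eatCont, decodeB_nil]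
  | case18 b rest h1 h2 h3 h4 ih =>
    have hL : uLenB b = 0 := by simp only [uLenB]; split_ifs <;> omega
    rw [decodeB_len0 b rest hL, utf8Replace_cons]
    simp only [if_neg h1, if_neg h2, if_neg h3, if_neg h4, ih]

theorem main_eq (file_content key : String) (hD : Dom_decrypt_file file_content key)
    (hP : Pre_decrypt_file file_content key) :
    decrypt_file file_content key = decrypt_file_alt file_content key := by
  obtain ⟨hhex0, hkne⟩ := hP
  have hhex : ∀ s ∈ hexSlices file_content.toList, hexByteOk s = true := by
    intro s hs
    obtain ⟨i, hi, rfl⟩ := hexSlices_mem_shape file_content.toList s hs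
    exact hhex0 i (by
      rw [String.length_toList] at hi
      rw [List.mem_range]
      omega)
  have hDk : pvDomStr key = true := by
    unfold Dom_decrypt_file at hD
    simp only [Bool.and_eq_true] at hD
    exact hD.2
  have hkey : ∀ c ∈ key.toList, c.toNat < 128 := by
    intro c hc
    exact domChar_lt c ((List.all_eq_true.mp hDk) c hc)
  have hkv256 : ∀ x ∈ key.toList.map (fun c => c.toNat), x < 256 := by
    intro x hx
    rw [List.mem_map] at hx
    obtain ⟨c, hc, rfl⟩ := hx
    have := hkey c hc
    omega
  have hK : 0 < (key.toList.map (fun c => c.toNat)).length := by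
    rw [List.length_map]
    have : key.toList ≠ [] := fun h => hkne (String.toList_eq_nil_iff.mp h)
    exact List.length_pos_of_ne_nil this
  -- names for the shared pieces
  set kv := key.toList.map (fun c => c.toNat) with hkv_def
  set dataBytes := hexSlices file_content.toList with hdb_def
  set data := dataBytes.map getHex with hdata_def
  set n := data.length with hn_def
  set K := kv.length with hK_def
  set ks := ((List.replicate (n / K + 1) kv).flatten).take n with hks_def
  have hd256 : ∀ x ∈ data, x < 256 := by
    intro x hx
    rw [hdata_def, List.mem_map] at hx
    obtain ⟨s, hs, rfl⟩ := hx
    exact getHex_lt s (hhex s hs)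
  have hnK : n ≤ (n / K + 1) * K := by
    have h1 := Nat.div_add_mod n K
    have h2 : n % K < K := Nat.mod_lt _ hK
    have h3 : (n / K + 1) * K = K * (n / K) + K := by ring
    omega
  have hksl : ks.length = n := by
    rw [hks_def, List.length_take, length_flatten_replicate, ← hK_def]
    omega
  have hksget : ∀ i, i < n → ks[i]? = kv[i % K]? := by
    intro i hi
    rw [hks_def, List.getElem?_take, if_pos hi,
      flatten_replicate_getElem? kv hK (n / K + 1) i (by rw [← hK_def]; omega)]
  have hks256 : ∀ x ∈ ks, x < 256 := by
    intro x hx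
    have hx2 := List.mem_of_mem_take hx
    rw [List.mem_flatten] at hx2
    obtain ⟨l, hl, hxl⟩ := hx2
    rw [List.eq_of_mem_replicate hl] at hxl
    exact hkv256 x hxl
  -- reduce both sides
  unfold decrypt_file decrypt_file_alt
  simp only [encFlatten key.toList hkey, encFoldrB key.toList hkey,
    dataB_eq file_content.toList, decodeB_eq, ← hkv_def, ← hdb_def, ← hdata_def, ← hn_def,
    hexSlices_flatten (kv.map byteToHex) (by intro x hx; rw [List.mem_map] at hx; obtain ⟨b, _, rfl⟩ := hx; rfl)]
  congr 1
  congr 1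
  -- right side: big-integer XOR = byte-wise XOR
  rw [← fromBytesBE_zipWith_xor data ks (by omega) hd256 hks256]
  have hzl : n = (List.zipWith (· ^^^ ·) data ks).length := by
    rw [List.length_zipWith, hksl]
    omega
  rw [hzl, toBytesBE_fromBytesBE _ (zipWith_xor_lt_256 data ks hd256 hks256)]
  -- left side: the append loop is a map over enumerate
  rw [PySem.List.foldl_append_singleton_eq_map
    (fun p : Int × List Char => (getHex p.2) ^^^
      (getHex (PySem.List.pyGetD (kv.map byteToHex) (PySem.Int.mod p.1 (((kv.map byteToHex).length : Nat) : Int)) []))) _ []]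
  rw [List.nil_append]
  apply List.ext_getElem?
  intro i
  rw [List.getElem?_map, PySem.List.getElem?_enumerate, List.getElem?_zipWith]
  by_cases hi : i < dataBytes.length
  · have hin : i < n := by rw [hn_def, hdata_def, List.length_map]; exact hi
    rw [List.getElem?_eq_getElem hi]
    have hdi : data[i]? = some (getHex dataBytes[i]) := by
      rw [hdata_def, List.getElem?_map, List.getElem?_eq_getElem hi, Option.map_some]
    have hmK : i % K < kv.length := by rw [← hK_def]; exact Nat.mod_lt _ hK
    have hksi : ks[i]? = some kv[i % K] := by
      rw [hksget i hin, List.getElem?_eq_getElem hmK]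
    rw [hdi, hksi]
    simp only [Option.map_some]
    congr 1
    rw [List.length_map, ← hK_def, int_mod_nat i K,
      pyGetD_nat_lt _ _ _ (by rw [List.length_map, ← hK_def]; exact Nat.mod_lt _ hK),
      List.getElem_map, getHex_byteToHex _ (hkv256 _ (List.getElem_mem _))]
  · have hin : ¬ i < n := by rw [hn_def, hdata_def, List.length_map]; exact hi
    rw [List.getElem?_eq_none (by omega)]
    have : data[i]? = none := by
      rw [hdata_def, List.getElem?_map, List.getElem?_eq_none (by omega), Option.map_none]
    rw [this]
    rfl

-- ===== VERDICT (by name: the statement is the Claim_ definition above) =====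
theorem decrypt_file_spec : Claim_equal_decrypt_file := by
  intro fc key hD hP
  unfold Spec_decrypt_file
  exact main_eq fc key hD hP
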